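-- pv_equiv track=rewrite | github.com/nkr22/TechnicalInterviewCourse | Class_04_Array_Problems_Easy/Practice_Easy/Problems/missingnumber.py | missingnum2
-- ===== SOURCE A (Python) =====
-- def missingnum2(arr):
--     counter=0
--     countertocompare=1
--     while counter <len(arr):
--         if arr[counter] != countertocompare:
--             return countertocompare
--         countertocompare+=1
--         counter+=1
-- ===== SOURCE B (Python) =====
-- def missingnum2(arr):
--     lo, hi = 0, len(arr)
--     while lo < hi:
--         mid = (lo + hi) // 2
--         if arr[mid] == mid + 1:
--             lo = mid + 1
--         else:
--             hi = mid
--     return lo + 1 if lo < len(arr) else None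
-- ===== Notes on version B (the rewrite author's own statement) =====
-- stated objective: alternative
-- what changed: replaced the left-to-right linear scan for the first position with arr[i] != i+1 by a binary search for that position, valid under the stated precondition that matching positions form a prefix (the intended 'sorted consecutive numbers starting at 1, with one gap' input shape)
-- outside the precondition, e.g. on missingnum2([5, 2, 3]): A returns 1, B returns None
import Mathlib
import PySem

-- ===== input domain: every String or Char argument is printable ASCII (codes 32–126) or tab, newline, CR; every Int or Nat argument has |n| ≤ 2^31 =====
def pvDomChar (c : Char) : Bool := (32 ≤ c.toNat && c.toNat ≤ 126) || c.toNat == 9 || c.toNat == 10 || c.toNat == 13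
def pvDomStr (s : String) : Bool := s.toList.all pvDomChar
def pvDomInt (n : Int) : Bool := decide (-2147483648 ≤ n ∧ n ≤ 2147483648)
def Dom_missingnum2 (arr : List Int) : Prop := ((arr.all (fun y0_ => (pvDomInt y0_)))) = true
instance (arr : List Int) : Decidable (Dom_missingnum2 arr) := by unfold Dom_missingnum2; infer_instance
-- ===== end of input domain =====

-- B replaces A's linear scan by a binary search for the first index i with arr[i] ≠ i+1,
-- exact under Pre_: positions where arr[i] = i+1 form a prefix.

-- ===== PORT A =====
-- the while loop of A, step for step: counter, countertocompare
def missingnum2Loop (arr : List Int) (counter countertocompare : Int) : Option Int :=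
  if _h : counter < (arr.length : Int) then
    if PySem.List.pyGetD arr counter 0 ≠ countertocompare then some countertocompare
    else missingnum2Loop arr (counter + 1) (countertocompare + 1)
  else none
termination_by ((arr.length : Int) - counter).toNat
decreasing_by omega

def missingnum2 (arr : List Int) : Option Int :=
  missingnum2Loop arr 0 1

-- ===== PORT B =====
-- the while loop of Source B: lo, hi, mid = (lo+hi)//2
def missingnum2BS (arr : List Int) (lo hi : Int) : Int :=
  if _h : lo < hi then
    let mid := PySem.Int.floordiv (lo + hi) 2
    if PySem.List.pyGetD arr mid 0 = mid + 1 then missingnum2BS arr (mid + 1) hi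
    else missingnum2BS arr lo mid
  else lo
termination_by (hi - lo).toNat
decreasing_by
  · have := PySem.Int.floordiv_two_mid_bounds (lo := lo) (hi := hi) (by omega)
    omega
  · have : PySem.Int.floordiv (lo + hi) 2 < hi := by
      rw [PySem.Int.floordiv_lt_iff_lt_mul (by omega)]; omega
    omega

def missingnum2_alt (arr : List Int) : Option Int :=
  let lo := missingnum2BS arr 0 (arr.length : Int)
  if lo < (arr.length : Int) then some (lo + 1) else none

-- ===== PRECONDITION & SPEC =====
-- Pre_ excludes lists where a position with arr[j] = j+1 follows a mismatched position:
-- binary search needs the matching positions to form a prefix (the intended input shape,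
-- 'consecutive numbers from 1 with at most one gap'); A still returns on excluded inputs.
def Pre_missingnum2 (arr : List Int) : Prop :=
  ∀ i ∈ List.range arr.length, ∀ j ∈ List.range arr.length,
    i ≤ j → arr.getD j 0 = (j : Int) + 1 → arr.getD i 0 = (i : Int) + 1
instance (arr : List Int) : Decidable (Pre_missingnum2 arr) := by
  unfold Pre_missingnum2; infer_instance

def pvWitness_missingnum2 : List Int := [1, 2, 4]

def Spec_missingnum2 (arr : List Int) (out : Option Int) : Prop := out = missingnum2_alt arr
instance (arr : List Int) (out : Option Int) : Decidable (Spec_missingnum2 arr out) := by unfold Spec_missingnum2; infer_instance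

-- ===== CLAIM (what is proved, stated in full; the proofs are below) =====
def Claim_equal_missingnum2 : Prop := ∀ (arr : List Int), Dom_missingnum2 arr → Pre_missingnum2 arr → Spec_missingnum2 arr (missingnum2 arr)

-- ===== LEMMAS AND PROOFS =====

-- Nat-indexed first-mismatch scan (proof-side common spec)
def pvFM (arr : List Int) (c : Nat) : Option Int :=
  if c < arr.length then
    if PySem.List.pyGetD arr (c : Int) 0 ≠ (c : Int) + 1 then some ((c : Int) + 1) else pvFM arr (c + 1)
  else none
termination_by arr.length - c

lemma pre_mono (arr : List Int) (hp : Pre_missingnum2 arr) :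
    ∀ i j : Int, 0 ≤ i → i ≤ j → j < (arr.length : Int) → PySem.List.pyGetD arr j 0 = j + 1 → PySem.List.pyGetD arr i 0 = i + 1 := by
  intro i j hi hij hj hMj
  have hjn : j = ((j.toNat : Nat) : Int) := by omega
  have hin : i = ((i.toNat : Nat) : Int) := by omega
  have := hp i.toNat (by simp; omega) j.toNat (by simp; omega) (by omega)
  rw [hin]; rw [hjn] at hMj
  simp only [PySem.List.pyGetD_natCast] at hMj ⊢
  exact this hMj

lemma loopA_eq_fm (arr : List Int) : ∀ n c : Nat, arr.length - c = n →
    missingnum2Loop arr (c : Int) ((c : Int) + 1) = pvFM arr c := by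
  intro n
  induction n with
  | zero =>
    intro c hc
    rw [missingnum2Loop, pvFM]
    simp only [dif_neg (by omega : ¬ ((c : Int) < (arr.length : Int)))]
    rw [if_neg (by omega)]
  | succ n ih =>
    intro c hc
    rw [missingnum2Loop, pvFM]
    by_cases h : c < arr.length
    · rw [dif_pos (by omega : (c : Int) < (arr.length : Int)), if_pos h]
      by_cases hm : PySem.List.pyGetD arr (c : Int) 0 = (c : Int) + 1
      · rw [if_neg (by simpa using hm), if_neg (by simpa using hm)]
        have : ((c : Int) + 1) = (((c + 1 : Nat) : Nat) : Int) := by push_cast; ring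
        rw [this]
        have h2 : (((c + 1 : Nat)) : Int) + 1 = ((c : Int) + 1) + 1 := by push_cast; ring
        rw [← h2] at *
        exact ih (c + 1) (by omega)
      · rw [if_pos (by simpa using hm), if_pos (by simpa using hm)]
    · rw [dif_neg (by omega : ¬ ((c : Int) < (arr.length : Int))), if_neg h]

-- binary-search invariant: if matches fill [0, lo) and mismatches fill [hi, len),
-- the loop returns the boundary point
lemma bs_spec (arr : List Int) (hp : Pre_missingnum2 arr) :
    ∀ n (lo hi : Int), (hi - lo).toNat ≤ n → 0 ≤ lo → lo ≤ hi → hi ≤ (arr.length : Int) →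
    (∀ i : Int, 0 ≤ i → i < lo → PySem.List.pyGetD arr i 0 = i + 1) →
    (∀ i : Int, hi ≤ i → i < (arr.length : Int) → PySem.List.pyGetD arr i 0 ≠ i + 1) →
    (let r := missingnum2BS arr lo hi;
      0 ≤ r ∧ r ≤ (arr.length : Int) ∧
      (∀ i : Int, 0 ≤ i → i < r → PySem.List.pyGetD arr i 0 = i + 1) ∧
      (∀ i : Int, r ≤ i → i < (arr.length : Int) → PySem.List.pyGetD arr i 0 ≠ i + 1)) := by
  intro n
  induction n with
  | zero =>
    intro lo hi hn h0 hlh hhl hlow hhigh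
    rw [missingnum2BS]
    simp only [dif_neg (by omega : ¬ lo < hi)]
    exact ⟨h0, by omega, hlow, fun i h1 h2 => hhigh i (by omega) h2⟩
  | succ n ih =>
    intro lo hi hn h0 hlh hhl hlow hhigh
    by_cases h : lo < hi
    · have hmid := PySem.Int.floordiv_two_mid_bounds (lo := lo) (hi := hi) (by omega)
      have hmidlt : PySem.Int.floordiv (lo + hi) 2 < hi := by
        rw [PySem.Int.floordiv_lt_iff_lt_mul (by omega)]; omega
      set mid := PySem.Int.floordiv (lo + hi) 2 with hmiddef
      rw [missingnum2BS]
      simp only [dif_pos h, ← hmiddef]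
      by_cases hm : PySem.List.pyGetD arr mid 0 = mid + 1
      · rw [if_pos hm]
        exact ih (mid + 1) hi (by omega) (by omega) (by omega) hhl
          (fun i hi0 hilt => pre_mono arr hp i mid hi0 (by omega) (by omega) hm) hhigh
      · rw [if_neg hm]
        refine ih lo mid (by omega) h0 (by omega) (by omega) hlow ?_
        intro i hmi hilt hMi
        exact hm (pre_mono arr hp mid i (by omega) hmi hilt hMi)
    · rw [missingnum2BS]
      simp only [dif_neg h]
      exact ⟨h0, by omega, hlow, fun i h1 h2 => hhigh i (by omega) h2⟩

lemma fm_of_boundary (arr : List Int) (r : Int)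
    (_hr0 : 0 ≤ r) (_hrl : r ≤ (arr.length : Int))
    (hlow : ∀ i : Int, 0 ≤ i → i < r → PySem.List.pyGetD arr i 0 = i + 1)
    (hhigh : ∀ i : Int, r ≤ i → i < (arr.length : Int) → PySem.List.pyGetD arr i 0 ≠ i + 1) :
    ∀ n c : Nat, arr.length - c = n → (c : Int) ≤ r →
    pvFM arr c = if r < (arr.length : Int) then some (r + 1) else none := by
  intro n
  induction n with
  | zero =>
    intro c hc hcr
    rw [pvFM, if_neg (by omega)]
    rw [if_neg (by omega : ¬ r < (arr.length : Int))]
  | succ n ih =>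
    intro c hc hcr
    rw [pvFM]
    by_cases h : c < arr.length
    · rw [if_pos h]
      by_cases hcr' : (c : Int) < r
      · rw [if_neg (by simpa using hlow (c : Int) (by omega) hcr')]
        exact ih (c + 1) (by omega) (by push_cast; omega)
      · have hceq : (c : Int) = r := by omega
        rw [if_pos (by simpa using hhigh (c : Int) (by omega) (by omega))]
        rw [if_pos (by omega : r < (arr.length : Int)), hceq]
    · rw [if_neg h, if_neg (by omega : ¬ r < (arr.length : Int))]

-- ===== VERDICT (by name: the statement is the Claim_ definition above) =====
theorem missingnum2_spec : Claim_equal_missingnum2 := by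
  intro arr _hdom hp
  unfold Spec_missingnum2 missingnum2 missingnum2_alt
  have hbs := bs_spec arr hp ((arr.length : Int) - 0).toNat 0 (arr.length : Int) (le_refl _)
    (by omega) (by omega) (by omega) (fun i h1 h2 => absurd h2 (by omega))
    (fun i h1 h2 => absurd h1 (by omega))
  obtain ⟨hr0, hrl, hlow, hhigh⟩ := hbs
  have h1 : missingnum2Loop arr ((0 : Nat) : Int) (((0 : Nat) : Int) + 1) = pvFM arr 0 :=
    loopA_eq_fm arr (arr.length - 0) 0 rfl
  simp only [Nat.cast_zero, zero_add] at h1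
  rw [h1]
  exact fm_of_boundary arr _ hr0 hrl hlow hhigh (arr.length - 0) 0 rfl (by omega)
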